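-- pv_equiv track=rewrite | github.com/jqinak/JEPO | jepo/workers/lewm_reward_worker.py | _pad_views_to_time
-- ===== SOURCE A (Python) =====
-- from typing import Any
--
-- def _pad_views_to_time(expert_views_per_traj: list[list[Any]], expected_time: int) -> list[list[Any]]:
--     padded: list[list[Any]] = []
--     for views in expert_views_per_traj:
--         if not views:
--             raise ValueError("expert_views_per_traj contains an empty trajectory")
--         row = list(views[:expected_time])
--         if len(row) < expected_time:
--             row.extend([row[-1]] * (expected_time - len(row)))
--         padded.append(row)
--     return padded
-- ===== SOURCE B (Python) =====
-- def _pad_views_to_time(expert_views_per_traj, expected_time):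
--     padded = []
--     for views in expert_views_per_traj:
--         if not views:
--             raise ValueError("expert_views_per_traj contains an empty trajectory")
--         last = len(views) - 1
--         padded.append([views[i if i < last else last] for i in range(expected_time)])
--     return padded
-- ===== Notes on version B (the rewrite author's own statement) =====
-- stated objective: idiomatic
-- what changed: Replaces the slice-then-conditionally-extend construction by a single clamped-index comprehension over range(expected_time), so each row is built in one pass with no truncate/pad split.
-- outside the precondition, e.g. on _pad_views_to_time([[1, 2, 3]], -1): A returns [[1, 2]], B returns [[]]
import Mathlib
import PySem

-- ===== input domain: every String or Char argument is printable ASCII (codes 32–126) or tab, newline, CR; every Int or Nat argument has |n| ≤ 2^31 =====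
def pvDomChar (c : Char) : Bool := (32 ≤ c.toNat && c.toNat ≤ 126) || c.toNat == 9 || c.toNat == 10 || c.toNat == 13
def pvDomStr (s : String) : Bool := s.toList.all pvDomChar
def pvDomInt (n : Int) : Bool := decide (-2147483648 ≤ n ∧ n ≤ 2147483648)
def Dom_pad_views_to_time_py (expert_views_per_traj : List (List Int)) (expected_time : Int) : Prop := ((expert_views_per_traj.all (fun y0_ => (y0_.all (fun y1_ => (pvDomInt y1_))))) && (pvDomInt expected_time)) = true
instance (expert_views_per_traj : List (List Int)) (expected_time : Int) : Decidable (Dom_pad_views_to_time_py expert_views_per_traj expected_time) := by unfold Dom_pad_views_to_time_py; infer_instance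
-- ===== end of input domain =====

-- B builds each padded row in one pass with a clamped-index comprehension instead of A's
-- slice-then-conditionally-extend (idiomatic; same asymptotic cost); equal on Pre_ below.


-- ===== PORT A =====
-- 'if not views: raise ValueError' is excluded by Pre_; on Pre_ the pyGetD default 0 is never used
-- (the extend branch only fires when 0 < expected_time, so row is nonempty there).
def pad_views_to_time_py (expert_views_per_traj : List (List Int)) (expected_time : Int) : List (List Int) :=
  expert_views_per_traj.foldl (fun padded views =>
    let row := PySem.List.slice views none (some expected_time)
    let row2 := if (row.length : Int) < expected_time
      then row ++ List.replicate (expected_time - (row.length : Int)).toNat (PySem.List.pyGetD row (-1) 0)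
      else row
    padded ++ [row2]) []

-- ===== PORT B =====
-- same raise guard as A (excluded by Pre_); the pyGetD default 0 is never used on Pre_.
def pad_views_to_time_py_alt (expert_views_per_traj : List (List Int)) (expected_time : Int) : List (List Int) :=
  expert_views_per_traj.foldl (fun padded views =>
    let last : Int := (views.length : Int) - 1
    padded ++ [(PySem.List.pyRange 0 expected_time 1).map (fun i =>
        PySem.List.pyGetD views (if i < last then i else last) 0)]) []

-- ===== PRECONDITION & SPEC =====
-- Pre_ excludes (1) inputs with an empty trajectory, where A raises ValueError (and B raises too), and
-- (2) negative expected_time with some trajectory longer than |expected_time| — a degenerate corner no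
-- caller would specify, where A's nonempty negative-slice-truncated rows and B's empty rows are both
-- accidental readings (for shorter trajectories both return empty rows and equality stays claimed).
def Pre_pad_views_to_time_py (expert_views_per_traj : List (List Int)) (expected_time : Int) : Prop :=
  (∀ views ∈ expert_views_per_traj, views ≠ []) ∧
  (0 ≤ expected_time ∨ ∀ views ∈ expert_views_per_traj, (views.length : Int) ≤ -expected_time)
instance (expert_views_per_traj : List (List Int)) (expected_time : Int) : Decidable (Pre_pad_views_to_time_py expert_views_per_traj expected_time) := by unfold Pre_pad_views_to_time_py; infer_instance

def pvWitness_pad_views_to_time_py : List (List Int) × Int := ([[1, 2], [5]], 3)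

def Spec_pad_views_to_time_py (expert_views_per_traj : List (List Int)) (expected_time : Int) (out : List (List Int)) : Prop := out = pad_views_to_time_py_alt expert_views_per_traj expected_time
instance (expert_views_per_traj : List (List Int)) (expected_time : Int) (out : List (List Int)) : Decidable (Spec_pad_views_to_time_py expert_views_per_traj expected_time out) := by unfold Spec_pad_views_to_time_py; infer_instance

-- ===== CLAIM (what is proved, stated in full; the proofs are below) =====
def Claim_equal_pad_views_to_time_py : Prop := ∀ (expert_views_per_traj : List (List Int)) (expected_time : Int), Dom_pad_views_to_time_py expert_views_per_traj expected_time → Pre_pad_views_to_time_py expert_views_per_traj expected_time → Spec_pad_views_to_time_py expert_views_per_traj expected_time (pad_views_to_time_py expert_views_per_traj expected_time)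

-- ===== LEMMAS AND PROOFS =====

-- One row: A's truncate/pad equals B's clamped-index comprehension, for a nonempty views and n = expected_time.toNat.
theorem pv_row_eq (views : List Int) (h : views ≠ []) (n : Nat) :
    (if ((views.take n).length : Int) < (n : Int)
      then views.take n ++ List.replicate ((n : Int) - ((views.take n).length : Int)).toNat
            (PySem.List.pyGetD (views.take n) (-1) 0)
      else views.take n)
    = (List.map (fun (k : Nat) => (k : Int)) (List.range n)).map (fun i =>
        PySem.List.pyGetD views
          (if i < (views.length : Int) - 1 then i else (views.length : Int) - 1) 0) := by
  have hL : 0 < views.length := List.length_pos_iff.mpr h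
  by_cases hn : views.length < n
  · have htake : views.take n = views := List.take_of_length_le (by omega)
    rw [htake]
    rw [if_pos (by exact_mod_cast hn)]
    rw [PySem.List.pyGetD_neg_one views 0 h]
    apply List.ext_getElem
    · simp; omega
    · intro k hk1 hk2
      simp only [List.getElem_map, List.getElem_range] at *
      by_cases hkL : k < views.length
      · rw [List.getElem_append_left hkL]
        by_cases hkl : (k : Int) < (views.length : Int) - 1
        · rw [if_pos hkl, PySem.List.pyGetD_eq_getElem views 0 (by omega) (by omega)]
          simp
        · rw [if_neg hkl,
            PySem.List.pyGetD_eq_getElem views 0 (by omega) (by omega)]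
          congr 1
          omega
      · rw [List.getElem_append_right (by omega)]
        rw [List.getElem_replicate]
        rw [if_neg (by omega),
          PySem.List.pyGetD_eq_getElem views 0 (by omega) (by omega)]
        rw [List.getLast_eq_getElem]
        congr 1
        omega
  · have hlen : (views.take n).length = n := by simp; omega
    rw [if_neg (by rw [hlen]; omega)]
    apply List.ext_getElem
    · simp; omega
    · intro k hk1 hk2
      simp only [List.getElem_map, List.getElem_range]
      rw [List.getElem_take]
      rw [hlen] at hk1
      by_cases hkl : (k : Int) < (views.length : Int) - 1
      · rw [if_pos hkl, PySem.List.pyGetD_eq_getElem views 0 (by omega) (by omega)]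
        simp
      · rw [if_neg hkl, PySem.List.pyGetD_eq_getElem views 0 (by omega) (by omega)]
        congr 1
        omega

-- ===== VERDICT (by name: the statement is the Claim_ definition above) =====
theorem pad_views_to_time_py_spec : Claim_equal_pad_views_to_time_py := by
  intro ts t _ hpre
  obtain ⟨hne, hcase⟩ := hpre
  unfold Spec_pad_views_to_time_py pad_views_to_time_py pad_views_to_time_py_alt
  apply PySem.List.foldl_congr_mem
  intro acc views hmem
  have h := hne views hmem
  simp only []
  congr 1
  rcases hcase with ht | hshort
  · have ht' : t = ((t.toNat : Nat) : Int) := by omega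
    rw [ht', PySem.List.slice_to_natCast, PySem.List.pyRange_zero_natCast]
    exact congrArg (fun r => [r]) (pv_row_eq views h t.toNat)
  · -- negative expected_time, every trajectory of length ≤ -t: both rows are empty
    have hlen := hshort views hmem
    by_cases h0 : 0 ≤ t
    · exfalso
      have := List.length_pos_iff.mpr h
      omega
    · have hk : t = -(((-t).toNat : Nat) : Int) := by omega
      rw [hk, PySem.List.slice_to_neg_natCast views ((-t).toNat) (by omega)]
      have htk : views.length - (-t).toNat = 0 := by omega
      rw [htk]
      simp
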